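-- pv_equiv track=rewrite | github.com/lieblb/tiltr | headless/robot/pkg/driver/batch.py | remove_trailing_zeros
-- ===== SOURCE A (Python) =====
-- def remove_trailing_zeros(s):
-- 	parts = s.split(".")
-- 	if len(parts) == 2 and all(x == "0" for x in parts[1]):
-- 		# e.g. 2.00 -> 2
-- 		return parts[0]
-- 	elif len(parts) == 2 and s[-1] == "0":
-- 		# e.g. 2.10 -> 2.1
-- 		while s[-1] == "0":
-- 			s = s[:-1]
-- 		return s
-- 	else:
-- 		return s
-- ===== SOURCE B (Python) =====
-- def remove_trailing_zeros(s):
--     # One fused backward scan: track the cut position past the removable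
--     # trailing "0"s (and a dangling "."), and count dots in the same pass.
--     cut = len(s)
--     dots = 0
--     in_zeros = True
--     for i in range(len(s) - 1, -1, -1):
--         c = s[i]
--         if in_zeros:
--             if c == "0":
--                 cut = i
--             else:
--                 in_zeros = False
--                 if c == ".":
--                     cut = i
--         if c == ".":
--             dots += 1
--     return s[:cut] if dots == 1 else s
-- ===== Notes on version B (the rewrite author's own statement) =====
-- stated objective: alternative
-- what changed: A splits the string at the decimal point, tests the fractional part for all-zeros, and peels trailing zeros with a while loop over string slices; B never splits: one fused backward scan over the characters computes the cut position past the removable trailing zeros (and a dangling decimal point) and counts the decimal points in the same pass, then takes a single prefix slice.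
import Mathlib
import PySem

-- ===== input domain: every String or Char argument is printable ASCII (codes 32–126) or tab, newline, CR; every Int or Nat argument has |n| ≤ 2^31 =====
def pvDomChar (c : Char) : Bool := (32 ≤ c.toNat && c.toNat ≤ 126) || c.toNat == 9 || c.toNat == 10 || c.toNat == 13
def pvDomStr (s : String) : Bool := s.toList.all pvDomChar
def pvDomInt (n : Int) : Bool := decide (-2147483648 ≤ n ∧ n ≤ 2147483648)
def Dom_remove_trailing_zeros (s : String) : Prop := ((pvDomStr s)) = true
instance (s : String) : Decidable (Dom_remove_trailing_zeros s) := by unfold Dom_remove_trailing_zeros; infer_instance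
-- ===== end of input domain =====

-- B replaces A's split-and-branch logic (split on '.', all-zeros test, manual while-peel loop)
-- by a single fused backward scan that computes the cut position and the dot count in one pass
-- (objective: alternative — one-pass state machine instead of staged string surgery).

-- ===== PORT A =====
-- while s[-1] == "0": s = s[:-1]   (s[-1] via pyGet?, s[:-1] via slice)
def stripLoopA (l : List Char) : List Char :=
  if PySem.List.pyGet? l (-1) == some '0' then
    stripLoopA (PySem.List.slice l none (some (-1)))
  else l
termination_by l.length
decreasing_by
  rename_i h
  rw [PySem.List.slice_to_neg_one]
  cases l with
  | nil => simp [PySem.List.pyGet?, PySem.List.pyIdx?] at h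
  | cons a t => simp

def remove_trailing_zeros (s : String) : String :=
  let parts := (PySem.Str.split? s ".").getD []   -- sep "." is non-empty, so split? never raises
  -- all(x == "0" for x in parts[1]): iterating a Python str yields 1-char strings; x == "0" is the char test
  if parts.length == 2 && (PySem.List.pyGetD parts 1 "").toList.all (fun x => x == '0') then
    PySem.List.pyGetD parts 0 ""
  else if parts.length == 2 && PySem.Str.pyGet? s (-1) == some '0' then
    String.ofList (stripLoopA s.toList)
  else s

-- ===== PORT B =====
-- the loop body of Source B: state (cut, dots, in_zeros), current index i, current char c = s[i]
-- (i is always in range when the loop reads it, so pyGetD's default is never used)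
def stepB (l : List Char) (st : Int × Int × Bool) (i : Int) : Int × Int × Bool :=
  let c := PySem.List.pyGetD l i ' '
  let st1 : Int × Int × Bool :=
    if st.2.2 then
      if c == '0' then (i, st.2.1, true)
      else if c == '.' then (i, st.2.1, false)
      else (st.1, st.2.1, false)
    else st
  if c == '.' then (st1.1, st1.2.1 + 1, st1.2.2) else st1

-- for i in range(len(s)-1, -1, -1): …
def runB (l : List Char) (st : Int × Int × Bool) : Int × Int × Bool :=
  (PySem.List.pyRange ((l.length : Int) - 1) (-1) (-1)).foldl (stepB l) st

def remove_trailing_zeros_alt (s : String) : String :=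
  let st := runB s.toList ((s.toList.length : Int), 0, true)
  if st.2.1 == 1 then String.ofList (PySem.List.slice s.toList none (some st.1)) else s

-- ===== PRECONDITION & SPEC =====
def Spec_remove_trailing_zeros (s : String) (out : String) : Prop := out = remove_trailing_zeros_alt s
instance (s : String) (out : String) : Decidable (Spec_remove_trailing_zeros s out) := by unfold Spec_remove_trailing_zeros; infer_instance

-- ===== CLAIM (what is proved, stated in full; the proofs are below) =====
def Claim_equal_remove_trailing_zeros : Prop := ∀ (s : String), Dom_remove_trailing_zeros s → Spec_remove_trailing_zeros s (remove_trailing_zeros s)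

-- ===== LEMMAS AND PROOFS =====

-- s.rstrip("0") as a reference: drop the maximal run of '0' at the right end
def rstripZeros (l : List Char) : List Char :=
  (l.reverse.dropWhile (fun c => c == '0')).reverse

-- the cut position B's scan computes, in closed form
def cutVal (l : List Char) : Int :=
  if (rstripZeros l).getLast? = some '.' then ((rstripZeros l).length : Int) - 1
  else ((rstripZeros l).length : Int)

-- reference single-char splitter, used to characterize PySem.Chars.splitOn on a one-char separator
def split1 (c : Char) : List Char → List (List Char)
  | [] => [[]]
  | x :: xs =>
    if x == c then [] :: split1 c xs
    else
      match split1 c xs with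
      | p :: ps => (x :: p) :: ps
      | [] => [[x]]

theorem split1_ne_nil (c : Char) (l : List Char) : split1 c l ≠ [] := by
  induction l with
  | nil => simp [split1]
  | cons x xs ih =>
    simp only [split1]
    split
    · simp
    · cases h : split1 c xs <;> simp

theorem splitOn_go_eq (c : Char) (fuel : Nat) (l cur : List Char) (acc : List (List Char))
    (h : l.length ≤ fuel) :
    PySem.Chars.splitOn.go [c] fuel l cur acc
      = acc.reverse ++ (split1 c l).modifyHead (cur.reverse ++ ·) := by
  induction fuel generalizing l cur acc with
  | zero =>
    have : l = [] := List.length_eq_zero_iff.mp (Nat.le_zero.mp h)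
    subst this
    simp [PySem.Chars.splitOn.go, split1]
  | succ n ih =>
    cases l with
    | nil => simp [PySem.Chars.splitOn.go, split1]
    | cons x xs =>
      simp only [PySem.Chars.splitOn.go]
      by_cases hx : x = c
      · subst hx
        have hpre : [x].isPrefixOf (x :: xs) = true := by simp [List.isPrefixOf]
        rw [if_pos hpre]
        have hdrop : List.drop [x].length (x :: xs) = xs := by simp
        rw [hdrop, ih xs [] (cur.reverse :: acc) (by simpa using Nat.le_of_succ_le_succ h)]
        simp only [split1, beq_self_eq_true, if_true, List.modifyHead_cons, List.reverse_cons,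
          List.append_assoc, List.append_nil, List.singleton_append]
        cases split1 x xs <;> simp
      · have hpre : [c].isPrefixOf (x :: xs) = false := by
          simp [List.isPrefixOf]
          intro hc; exact absurd hc.symm hx
        rw [if_neg (by simp [hpre])]
        rw [ih xs (x :: cur) acc (by simpa using Nat.le_of_succ_le_succ h)]
        have hne : (x == c) = false := by simp [hx]
        simp only [split1, hne, Bool.false_eq_true, if_false]
        cases hs : split1 c xs with
        | nil => exact absurd hs (split1_ne_nil c xs)
        | cons p ps => simp

theorem splitOn_eq_split1 (c : Char) (l : List Char) :
    PySem.Chars.splitOn l [c] = split1 c l := by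
  unfold PySem.Chars.splitOn
  rw [splitOn_go_eq c (l.length + 1) l [] [] (by omega)]
  cases h : split1 c l with
  | nil => exact absurd h (split1_ne_nil c l)
  | cons p ps => simp

theorem intercalate_cons₂ {α : Type} (sep a b : List α) (rest : List (List α)) :
    List.intercalate sep (a :: b :: rest) = a ++ sep ++ List.intercalate sep (b :: rest) := by
  simp [List.intercalate, List.intersperse]

theorem intercalate_single {α : Type} (sep a : List α) : List.intercalate sep [a] = a := by
  simp [List.intercalate]

theorem split1_intercalate (c : Char) (l : List Char) :
    List.intercalate [c] (split1 c l) = l := by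
  induction l with
  | nil => simp [split1, List.intercalate]
  | cons x xs ih =>
    simp only [split1]
    by_cases hx : x = c
    · subst hx
      simp only [beq_self_eq_true, if_true]
      cases hs : split1 x xs with
      | nil => exact absurd hs (split1_ne_nil x xs)
      | cons p ps =>
        rw [hs] at ih
        rw [intercalate_cons₂]
        simp [ih]
    · have hne : (x == c) = false := by simp [hx]
      simp only [hne, Bool.false_eq_true, if_false]
      cases hs : split1 c xs with
      | nil => exact absurd hs (split1_ne_nil c xs)
      | cons p ps =>
        rw [hs] at ih
        cases ps with
        | nil =>
          rw [intercalate_single] at ih ⊢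
          simp [ih]
        | cons q qs =>
          rw [intercalate_cons₂] at ih ⊢
          simp only [List.cons_append, List.append_assoc]
          simpa using ih

theorem split1_not_mem (c : Char) (l : List Char) :
    ∀ p ∈ split1 c l, c ∉ p := by
  induction l with
  | nil => simp [split1]
  | cons x xs ih =>
    simp only [split1]
    by_cases hx : x = c
    · subst hx
      simp only [beq_self_eq_true, if_true]
      intro p hp
      rcases List.mem_cons.mp hp with h | h
      · subst h; simp
      · exact ih p h
    · have hne : (x == c) = false := by simp [hx]
      simp only [hne, Bool.false_eq_true, if_false]
      cases hs : split1 c xs with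
      | nil => exact absurd hs (split1_ne_nil c xs)
      | cons p ps =>
        intro q hq
        rcases List.mem_cons.mp hq with h | h
        · subst h
          intro hmem
          rcases List.mem_cons.mp hmem with h' | h'
          · exact hx h'.symm
          · exact ih p (by rw [hs]; exact List.mem_cons_self) h'
        · exact ih q (by rw [hs]; exact List.mem_cons_of_mem _ h)

-- number of pieces = number of separators + 1
theorem split1_length (c : Char) (l : List Char) :
    (split1 c l).length = l.count c + 1 := by
  induction l with
  | nil => simp [split1]
  | cons x xs ih =>
    simp only [split1]
    by_cases hx : x = c
    · subst hx; simp [List.count_cons, ih]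
    · have hne : (x == c) = false := by simp [hx]
      simp only [hne, Bool.false_eq_true, if_false]
      cases hs : split1 c xs with
      | nil => exact absurd hs (split1_ne_nil c xs)
      | cons p ps =>
        rw [hs] at ih
        simp [List.count_cons, hne, ih]
        simp at ih
        omega

-- A's while loop equals rstrip('0'), on every list
theorem stripLoopA_eq (l : List Char) : stripLoopA l = rstripZeros l := by
  induction l using stripLoopA.induct with
  | case1 l h ih =>
    rw [stripLoopA, if_pos h, ih]
    rw [PySem.List.slice_to_neg_one] at ih ⊢
    cases hl : l.reverse with
    | nil => simp [List.reverse_eq_nil_iff.mp hl, PySem.List.pyGet?, PySem.List.pyIdx?] at h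
    | cons a t =>
      have hlast : PySem.List.pyGet? l (-1) = some a := by
        have : l = t.reverse ++ [a] := by
          have := congrArg List.reverse hl; simpa using this
        subst this
        simp [PySem.List.pyGet?, PySem.List.pyIdx?]
      rw [hlast] at h
      have ha : a = '0' := by simpa using h
      subst ha
      unfold rstripZeros
      have hdl : l.dropLast.reverse = t := by
        have : l = t.reverse ++ ['0'] := by
          have := congrArg List.reverse hl; simpa using this
        subst this; simp
      rw [hdl, hl]
      simp [List.dropWhile]
  | case2 l h =>
    rw [stripLoopA, if_neg h]
    unfold rstripZeros
    cases hl : l.reverse with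
    | nil => simp [List.reverse_eq_nil_iff.mp hl]
    | cons a t =>
      have hlast : PySem.List.pyGet? l (-1) = some a := by
        have : l = t.reverse ++ [a] := by
          have := congrArg List.reverse hl; simpa using this
        subst this
        simp [PySem.List.pyGet?, PySem.List.pyIdx?]
      rw [hlast] at h
      have ha : (a == '0') = false := by
        simp at h ⊢; intro hc; exact h hc
      rw [List.dropWhile_cons, ha]
      simp [← hl]

theorem pyGet?_neg_one_getLast (l : List Char) (a : Char) (t : List Char)
    (hl : l.reverse = a :: t) : PySem.List.pyGet? l (-1) = some a := by
  have : l = t.reverse ++ [a] := by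
    have := congrArg List.reverse hl; simpa using this
  subst this
  simp [PySem.List.pyGet?, PySem.List.pyIdx?]

theorem rstrip_split (p0 p1 : List Char) :
    rstripZeros (p0 ++ '.' :: p1) =
      if (p1.reverse.dropWhile (fun c => c == '0')).isEmpty then p0 ++ ['.']
      else p0 ++ '.' :: (p1.reverse.dropWhile (fun c => c == '0')).reverse := by
  unfold rstripZeros
  have hrev : (p0 ++ '.' :: p1).reverse = p1.reverse ++ '.' :: p0.reverse := by simp
  rw [hrev, List.dropWhile_append]
  by_cases h : (List.dropWhile (fun c => c == '0') p1.reverse).isEmpty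
  · rw [if_pos h, if_pos h]
    simp
  · rw [if_neg h, if_neg h]
    simp

theorem split_parts (s : String) :
    (PySem.Str.split? s ".").getD [] = (split1 '.' s.toList).map String.ofList := by
  simp [PySem.Str.split?, PySem.Chars.split?]
  rw [splitOn_eq_split1]

-- ---- characterization of B's scan ----

theorem rstripZeros_concat_zero (ys : List Char) :
    rstripZeros (ys ++ ['0']) = rstripZeros ys := by
  unfold rstripZeros
  simp [List.dropWhile]

theorem rstripZeros_concat_ne (ys : List Char) (c : Char) (hc : c ≠ '0') :
    rstripZeros (ys ++ [c]) = ys ++ [c] := by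
  unfold rstripZeros
  have : (c == '0') = false := by simpa using hc
  simp [List.dropWhile, this]

theorem rstripZeros_prefix (l : List Char) : rstripZeros l <+: l := by
  unfold rstripZeros
  have h : (l.reverse.dropWhile (fun c => c == '0')) <:+ l.reverse := List.dropWhile_suffix _
  have := List.reverse_prefix (l₁ := l.reverse.dropWhile (fun c => c == '0')) (l₂ := l.reverse)
  rw [List.reverse_reverse] at this
  exact this.mpr h

theorem runB_concat (ys : List Char) (c : Char) (st : Int × Int × Bool) :
    runB (ys ++ [c]) st = runB ys (stepB (ys ++ [c]) st (ys.length)) := by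
  unfold runB
  have hr : PySem.List.pyRange (((ys ++ [c]).length : Int) - 1) (-1) (-1)
      = (ys.length : Int) :: PySem.List.pyRange ((ys.length : Int) - 1) (-1) (-1) := by
    rw [PySem.List.pyRange_neg_one, PySem.List.pyRange_neg_one]
    have h1 : (((ys ++ [c]).length : Int) - 1 - -1).toNat = ys.length + 1 := by
      simp only [List.length_append, List.length_singleton]
      omega
    have h2 : (((ys.length : Int)) - 1 - -1).toNat = ys.length := by omega
    rw [h1, h2, List.range_succ_eq_map, List.map_cons, List.map_map]
    congr 1
    · push_cast; omega
    · apply List.map_congr_left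
      intro k _
      simp only [Function.comp_apply]
      push_cast; omega
  rw [hr]
  simp only [List.foldl_cons]
  apply PySem.List.foldl_congr_mem
  intro acc i hi
  rw [PySem.List.pyRange_neg_one] at hi
  simp at hi
  obtain ⟨k, hk, hik⟩ := hi
  have hkb : k < ys.length := by omega
  have hi' : i = ((ys.length - 1 - k : Nat) : Int) := by omega
  unfold stepB
  have hgd : PySem.List.pyGetD (ys ++ [c]) i ' ' = PySem.List.pyGetD ys i ' ' := by
    rw [hi', PySem.List.pyGetD_natCast, PySem.List.pyGetD_natCast]
    simp only [List.getD_eq_getElem?_getD]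
    rw [List.getElem?_append_left (by omega)]
  rw [hgd]

theorem pyGetD_concat_self (ys : List Char) (c : Char) :
    PySem.List.pyGetD (ys ++ [c]) ((ys.length : Int)) ' ' = c := by
  rw [PySem.List.pyGetD_natCast]
  simp [List.getD_append_right, List.getD]

theorem runB_false (l : List Char) :
    ∀ cut dots : Int, runB l (cut, dots, false) = (cut, dots + (l.count '.' : Int), false) := by
  induction l using List.reverseRecOn with
  | nil => intro cut dots; simp [runB, PySem.List.pyRange_neg_one]
  | append_singleton ys c ih =>
    intro cut dots
    rw [runB_concat]
    by_cases hd : c = '.'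
    · subst hd
      have hstep : stepB (ys ++ ['.']) (cut, dots, false) ((ys.length : Int))
          = (cut, dots + 1, false) := by
        simp [stepB, pyGetD_concat_self]
      rw [hstep, ih]
      simp [List.count_append, Prod.ext_iff]
      omega
    · have hdb : (c == '.') = false := by simpa using hd
      have hstep : stepB (ys ++ [c]) (cut, dots, false) ((ys.length : Int))
          = (cut, dots, false) := by
        simp [stepB, pyGetD_concat_self, hdb]
      rw [hstep, ih]
      simp [List.count_append, List.count_singleton, hdb]

theorem runB_true (l : List Char) :
    ∀ dots : Int, runB l ((l.length : Int), dots, true)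
      = (cutVal l, dots + (l.count '.' : Int), l.all (fun c => c == '0')) := by
  induction l using List.reverseRecOn with
  | nil =>
    intro dots
    simp [runB, PySem.List.pyRange_neg_one, cutVal, rstripZeros]
  | append_singleton ys c ih =>
    intro dots
    rw [runB_concat]
    by_cases h0 : c = '0'
    · subst h0
      have hstep : stepB (ys ++ ['0']) ((((ys ++ ['0']).length : Nat) : Int), dots, true) ((ys.length : Int))
          = ((ys.length : Int), dots, true) := by
        simp [stepB]
      rw [hstep, ih]
      have hcut : cutVal (ys ++ ['0']) = cutVal ys := by
        unfold cutVal; rw [rstripZeros_concat_zero]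
      have hcount : (ys ++ ['0']).count '.' = ys.count '.' := by
        simp [List.count_append]
      have hall : (ys ++ ['0']).all (fun c => c == '0') = ys.all (fun c => c == '0') := by
        simp
      rw [hcut, hcount, hall]
    · have h0b : (c == '0') = false := by simpa using h0
      by_cases hd : c = '.'
      · subst hd
        have hstep : stepB (ys ++ ['.']) ((((ys ++ ['.']).length : Nat) : Int), dots, true) ((ys.length : Int))
            = ((ys.length : Int), dots + 1, false) := by
          simp [stepB]
        rw [hstep, runB_false]
        have hcut : cutVal (ys ++ ['.']) = (ys.length : Int) := by
          unfold cutVal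
          rw [rstripZeros_concat_ne ys '.' (by decide)]
          simp
        have hall : (ys ++ ['.']).all (fun c => c == '0') = false := by simp
        rw [hcut, hall]
        simp [List.count_append, Prod.ext_iff]
        omega
      · have hdb : (c == '.') = false := by simpa using hd
        have hstep : stepB (ys ++ [c]) ((((ys ++ [c]).length : Nat) : Int), dots, true) ((ys.length : Int))
            = ((((ys ++ [c]).length : Nat) : Int), dots, false) := by
          simp [stepB, h0b, hdb]
        rw [hstep, runB_false]
        have hcut : cutVal (ys ++ [c]) = ((ys ++ [c]).length : Int) := by
          unfold cutVal
          rw [rstripZeros_concat_ne ys c h0,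
            if_neg (show ¬ (ys ++ [c]).getLast? = some '.' from by simpa using hd)]
        have hall : (ys ++ [c]).all (fun c => c == '0') = false := by simp [h0b]
        have hcount : (ys ++ [c]).count '.' = ys.count '.' := by
          simp [List.count_append, List.count_singleton, hdb]
        rw [hall, hcount, ← hcut]

-- B in closed form
theorem alt_eq (s : String) :
    remove_trailing_zeros_alt s =
      if s.toList.count '.' = 1 then
        (if (rstripZeros s.toList).getLast? = some '.'
          then String.ofList (rstripZeros s.toList).dropLast
          else String.ofList (rstripZeros s.toList))
      else s := by
  unfold remove_trailing_zeros_alt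
  rw [runB_true]
  simp only
  have hpre : rstripZeros s.toList <+: s.toList := rstripZeros_prefix s.toList
  have htake : s.toList.take (rstripZeros s.toList).length = rstripZeros s.toList :=
    (List.prefix_iff_eq_take.mp hpre).symm
  by_cases hcnt : s.toList.count '.' = 1
  · rw [if_pos hcnt]
    have : (((s.toList.count '.' : Int)) == 1) = true := by simp [hcnt]
    rw [hcnt]
    simp only [show ((0 : Int) + ((1 : Nat) : Int) == 1) = true by decide, if_true]
    unfold cutVal
    by_cases hlast : (rstripZeros s.toList).getLast? = some '.'
    · rw [if_pos hlast, if_pos hlast]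
      have hne : rstripZeros s.toList ≠ [] := by
        intro h; rw [h] at hlast; simp at hlast
      have hlen : 1 ≤ (rstripZeros s.toList).length := by
        cases hrr : rstripZeros s.toList with
        | nil => exact absurd hrr hne
        | cons a t => simp
      rw [PySem.List.slice_to s.toList (by omega)]
      have : (((rstripZeros s.toList).length : Int) - 1).toNat = (rstripZeros s.toList).length - 1 := by
        omega
      rw [this]
      have : s.toList.take ((rstripZeros s.toList).length - 1)
          = (rstripZeros s.toList).dropLast := by
        rw [List.dropLast_eq_take]
        calc s.toList.take ((rstripZeros s.toList).length - 1)
            = (s.toList.take (rstripZeros s.toList).length).take ((rstripZeros s.toList).length - 1) := by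
              rw [List.take_take]; congr 1; omega
          _ = (rstripZeros s.toList).take ((rstripZeros s.toList).length - 1) := by rw [htake]
      rw [this]
    · rw [if_neg hlast, if_neg hlast]
      rw [PySem.List.slice_to s.toList (by omega)]
      simp [htake]
  · rw [if_neg hcnt]
    have : (((0 : Int) + (s.toList.count '.' : Int)) == 1) = false := by
      simp; omega
    rw [this]
    simp

-- ===== MAIN PROOF =====
theorem remove_trailing_zeros_spec : Claim_equal_remove_trailing_zeros := by
  intro s _
  unfold Spec_remove_trailing_zeros remove_trailing_zeros
  rw [alt_eq]
  simp only [split_parts]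
  cases hps : split1 '.' s.toList with
  | nil => exact absurd hps (split1_ne_nil _ _)
  | cons p0 ps =>
    have hlen := split1_length '.' s.toList
    rw [hps] at hlen
    cases ps with
    | nil =>
      -- no '.' in s: count = 0, A returns s, B returns s
      have hcnt : s.toList.count '.' = 0 := by simp at hlen; omega
      rw [if_neg (show ¬ s.toList.count '.' = 1 by omega)]
      simp
    | cons p1 ps2 =>
      cases ps2 with
      | cons p2 ps3 =>
        have hcnt : 2 ≤ s.toList.count '.' := by simp at hlen; omega
        rw [if_neg (show ¬ s.toList.count '.' = 1 by omega)]
        simp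
      | nil =>
        have hcnt : s.toList.count '.' = 1 := by simp at hlen; omega
        rw [if_pos hcnt]
        have hl : s.toList = p0 ++ '.' :: p1 := by
          have h := split1_intercalate '.' s.toList
          rw [hps, intercalate_cons₂, intercalate_single] at h
          simpa using h.symm
        have hmem1 : '.' ∉ p1 := split1_not_mem '.' s.toList p1 (by rw [hps]; simp)
        by_cases hall : p1.all (fun x => x == '0')
        · -- first branch of A: fractional part all zeros
          have hdw : (List.dropWhile (fun c => c == '0') p1.reverse).isEmpty := by
            simp [List.dropWhile_eq_nil_iff]
            intro c hc
            exact (by simpa using (List.all_eq_true.mp hall) c (by simpa using hc))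
          have hstr : rstripZeros s.toList = p0 ++ ['.'] := by
            rw [hl, rstrip_split, if_pos hdw]
          have hlast : (rstripZeros s.toList).getLast? = some '.' := by
            rw [hstr]; simp
          have hcond : ∀ x ∈ p1, x = '0' := fun x hx => by
            simpa using List.all_eq_true.mp hall x hx
          rw [if_pos hlast, hstr]
          simp [hl, PySem.List.pyGetD, PySem.List.pyGet?, PySem.List.pyIdx?]
          intro x hx hnx
          exact absurd (hcond x hx) hnx
        · -- fractional part not all zeros
          have hdw : ¬ (List.dropWhile (fun c => c == '0') p1.reverse).isEmpty := by
            simp only [List.all_eq_true, not_forall] at hall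
            rcases hall with ⟨c, hc, hcz⟩
            simp [List.dropWhile_eq_nil_iff]
            exact ⟨c, by simpa using hc, by simpa using hcz⟩
          set d := List.dropWhile (fun c => c == '0') p1.reverse with hd
          have hdne : d ≠ [] := by simpa [List.isEmpty_iff] using hdw
          obtain ⟨a, t, hat⟩ := List.exists_cons_of_ne_nil hdne
          have haz : (a == '0') = false := by
            have := List.head?_dropWhile_not (fun c => c == '0') p1.reverse
            rw [← hd, hat] at this
            simpa using this
          have hap1 : a ∈ p1 := by
            have had : a ∈ d := by rw [hat]; exact List.mem_cons_self
            have hsub := List.dropWhile_sublist (l := p1.reverse) (p := fun c => c == '0')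
            rw [← hd] at hsub
            simpa using hsub.subset had
          have hstr : rstripZeros s.toList = p0 ++ '.' :: d.reverse := by
            rw [hl, rstrip_split, if_neg hdw]
          have hdrev : d.reverse = t.reverse ++ [a] := by rw [hat]; simp
          have hlastne : (rstripZeros s.toList).getLast? ≠ some '.' := by
            rw [hstr, hdrev,
              show p0 ++ '.' :: (t.reverse ++ [a]) = (p0 ++ '.' :: t.reverse) ++ [a] by simp]
            have hg : ((p0 ++ '.' :: t.reverse) ++ [a]).getLast? = some a := by
              rw [List.getLast?_eq_head?_reverse]
              simp
            rw [hg]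
            simp
            intro hc; exact hmem1 (hc ▸ hap1)
          rw [if_neg hlastne]
          have hcondn : ¬ ∀ x ∈ p1, x = '0' := by
            simp only [List.all_eq_true] at hall
            intro hc; exact hall (fun x hx => by simp [hc x hx])
          have hp1ne : p1 ≠ [] := by
            intro h; rw [h] at hall; simp at hall
          obtain ⟨b, u, hbu⟩ := List.exists_cons_of_ne_nil (l := p1.reverse) (by simpa using hp1ne)
          have hlastb : PySem.List.pyGet? s.toList (-1) = some b := by
            apply pyGet?_neg_one_getLast _ _ (u ++ '.' :: p0.reverse)
            rw [hl]; simp [hbu]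
          by_cases hb : b = '0'
          · -- A's second branch: ends in '0', strips trailing zeros
            subst hb
            have hp1e : p1 = u.reverse ++ ['0'] := by
              have := congrArg List.reverse hbu; simpa using this
            have hge : ('.' :: p1)[p1.length]'(by simp) = '0' := by
              have hsplit2 : ('.' :: p1) = ('.' :: u.reverse) ++ ['0'] := by rw [hp1e]; simp
              have hlen2 : p1.length = ('.' :: u.reverse).length := by rw [hp1e]; simp
              simp only [hsplit2, hlen2, List.getElem_concat_length]
            simp [hl, hcondn, stripLoopA_eq,
              PySem.List.pyGetD, PySem.List.pyGet?, PySem.List.pyIdx?]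
            intro hc
            exact absurd hge hc
          · -- A's else branch: s unchanged; B strips nothing
            have hid : rstripZeros s.toList = s.toList := by
              unfold rstripZeros
              have hrv : s.toList.reverse = b :: (u ++ '.' :: p0.reverse) := by
                rw [hl, show (p0 ++ '.' :: p1).reverse = p1.reverse ++ '.' :: p0.reverse by simp, hbu]
                simp
              rw [hrv, List.dropWhile_cons]
              simp only [show (b == '0') = false by simpa using hb, Bool.false_eq_true, if_false]
              rw [← hrv]; simp
            have hp1e : p1 = u.reverse ++ [b] := by
              have := congrArg List.reverse hbu; simpa using this
            have hge : ('.' :: p1)[p1.length]'(by simp) = b := by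
              have hsplit2 : ('.' :: p1) = ('.' :: u.reverse) ++ [b] := by rw [hp1e]; simp
              have hlen2 : p1.length = ('.' :: u.reverse).length := by rw [hp1e]; simp
              simp only [hsplit2, hlen2, List.getElem_concat_length]
            simp [hl, hcondn,
              PySem.List.pyGetD, PySem.List.pyGet?, PySem.List.pyIdx?]
            rw [if_neg (show ¬ ('.' :: p1)[p1.length]'(by simp) = '0' from by rw [hge]; exact hb),
              ← hl, hid, String.ofList_toList]
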